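-- pv_equiv track=rewrite | github.com/nigelnh/pc-builder-assistant | backend/app/services/performance_calculator.py | match_gpu_model
-- ===== SOURCE A (Python) =====
-- def match_gpu_model(gpu_name: str) -> str:
--     """
--     Match a GPU name to the closest model in our performance database
--     """
--     gpu_name = gpu_name.lower()
--
--     # NVIDIA GPUs
--     if "nvidia" in gpu_name or "geforce" in gpu_name or "rtx" in gpu_name or "gtx" in gpu_name:
--         # Check for RTX 40 series
--         for model in ["4090", "4080", "4070", "4060"]:
--             if f"rtx {model}" in gpu_name or f"rtx{model}" in gpu_name:
--                 return f"rtx {model}"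
--
--         # Check for RTX 30 series
--         for model in ["3090", "3080", "3070", "3060", "3050"]:
--             if f"rtx {model}" in gpu_name or f"rtx{model}" in gpu_name:
--                 return f"rtx {model}"
--
--         # Check for RTX 20 series
--         for model in ["2080", "2070", "2060"]:
--             if f"rtx {model}" in gpu_name or f"rtx{model}" in gpu_name:
--                 return f"rtx {model}"
--
--         # Check for GTX
--         for model in ["1660", "1650"]:
--             if f"gtx {model}" in gpu_name or f"gtx{model}" in gpu_name:
--                 return f"gtx {model}"
--
--     # AMD GPUs
--     if "amd" in gpu_name or "radeon" in gpu_name or "rx" in gpu_name: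
--         # Check for RX 7000 series
--         for model in ["7900", "7800", "7700", "7600"]:
--             if f"rx {model}" in gpu_name or f"rx{model}" in gpu_name:
--                 return f"rx {model}"
--
--         # Check for RX 6000 series
--         for model in ["6900", "6800", "6700", "6600", "6500"]:
--             if f"rx {model}" in gpu_name or f"rx{model}" in gpu_name:
--                 return f"rx {model}"
--
--     # Default fallback
--     return "rtx 3060"
-- ===== SOURCE B (Python) =====
-- # One flat ordered table replaces the nested brand-gated loops: each pattern
-- # already contains its brand token ("rtx"/"gtx"/"rx"), so the brand gates are
-- # redundant and the first matching entry in A's search order is the answer.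
-- _GPU_TABLE = [
--     ("rtx 4090", "rtx4090"), ("rtx 4080", "rtx4080"), ("rtx 4070", "rtx4070"), ("rtx 4060", "rtx4060"),
--     ("rtx 3090", "rtx3090"), ("rtx 3080", "rtx3080"), ("rtx 3070", "rtx3070"), ("rtx 3060", "rtx3060"), ("rtx 3050", "rtx3050"),
--     ("rtx 2080", "rtx2080"), ("rtx 2070", "rtx2070"), ("rtx 2060", "rtx2060"),
--     ("gtx 1660", "gtx1660"), ("gtx 1650", "gtx1650"),
--     ("rx 7900", "rx7900"), ("rx 7800", "rx7800"), ("rx 7700", "rx7700"), ("rx 7600", "rx7600"),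
--     ("rx 6900", "rx6900"), ("rx 6800", "rx6800"), ("rx 6700", "rx6700"), ("rx 6600", "rx6600"), ("rx 6500", "rx6500"),
-- ]
--
--
-- def match_gpu_model(gpu_name: str) -> str:
--     name = gpu_name.lower()
--     return next((spaced for spaced, compact in _GPU_TABLE
--                  if spaced in name or compact in name), "rtx 3060")
-- ===== Notes on version B (the rewrite author's own statement) =====
-- stated objective: simpler
-- what changed: Replaced the two brand-gated blocks of four/two hard-coded model loops by a single flat ordered table of (spaced, compact) patterns scanned once; the brand gates are provably redundant because every pattern contains its brand token.
import Mathlib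
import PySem

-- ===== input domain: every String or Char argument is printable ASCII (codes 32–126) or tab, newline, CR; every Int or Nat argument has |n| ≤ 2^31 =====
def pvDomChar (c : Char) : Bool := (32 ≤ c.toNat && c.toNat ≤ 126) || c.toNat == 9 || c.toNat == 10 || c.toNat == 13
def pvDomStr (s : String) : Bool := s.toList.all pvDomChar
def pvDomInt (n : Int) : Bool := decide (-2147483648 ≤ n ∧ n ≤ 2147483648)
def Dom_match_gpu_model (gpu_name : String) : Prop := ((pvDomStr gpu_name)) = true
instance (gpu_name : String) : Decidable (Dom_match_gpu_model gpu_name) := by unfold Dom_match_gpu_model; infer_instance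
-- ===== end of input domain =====

-- B replaces A's brand-gated nested model loops by one flat ordered pattern table (simpler; the gates are provably redundant).

-- ===== PORT A =====
-- transliteration of each 'for model in [...]' loop with its conditional return (f"rtx {model}" = pre ++ ' ' :: model)
def pvTryA (name pre : List Char) : List (List Char) → Option (List Char)
  | [] => none
  | m :: ms =>
    if PySem.Chars.isIn (pre ++ ' ' :: m) name || PySem.Chars.isIn (pre ++ m) name then
      some (pre ++ ' ' :: m)
    else pvTryA name pre ms

def match_gpu_model (gpu_name : String) : String :=
  let name := PySem.Chars.lower gpu_name.toList
  let nvRes : Option (List Char) :=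
    if PySem.Chars.isIn "nvidia".toList name || PySem.Chars.isIn "geforce".toList name ||
       PySem.Chars.isIn "rtx".toList name || PySem.Chars.isIn "gtx".toList name then
      match pvTryA name "rtx".toList ["4090".toList, "4080".toList, "4070".toList, "4060".toList] with
      | some r => some r
      | none =>
        match pvTryA name "rtx".toList ["3090".toList, "3080".toList, "3070".toList, "3060".toList, "3050".toList] with
        | some r => some r
        | none =>
          match pvTryA name "rtx".toList ["2080".toList, "2070".toList, "2060".toList] with
          | some r => some r
          | none => pvTryA name "gtx".toList ["1660".toList, "1650".toList]
    else none
  match nvRes with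
  | some r => String.ofList r
  | none =>
    let amdRes : Option (List Char) :=
      if PySem.Chars.isIn "amd".toList name || PySem.Chars.isIn "radeon".toList name ||
         PySem.Chars.isIn "rx".toList name then
        match pvTryA name "rx".toList ["7900".toList, "7800".toList, "7700".toList, "7600".toList] with
        | some r => some r
        | none => pvTryA name "rx".toList ["6900".toList, "6800".toList, "6700".toList, "6600".toList, "6500".toList]
      else none
    match amdRes with
    | some r => String.ofList r
    | none => "rtx 3060"

-- ===== PORT B =====
def pvGpuTable : List (List Char × List Char) :=
  [("rtx 4090".toList, "rtx4090".toList), ("rtx 4080".toList, "rtx4080".toList), ("rtx 4070".toList, "rtx4070".toList), ("rtx 4060".toList, "rtx4060".toList),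
   ("rtx 3090".toList, "rtx3090".toList), ("rtx 3080".toList, "rtx3080".toList), ("rtx 3070".toList, "rtx3070".toList), ("rtx 3060".toList, "rtx3060".toList), ("rtx 3050".toList, "rtx3050".toList),
   ("rtx 2080".toList, "rtx2080".toList), ("rtx 2070".toList, "rtx2070".toList), ("rtx 2060".toList, "rtx2060".toList),
   ("gtx 1660".toList, "gtx1660".toList), ("gtx 1650".toList, "gtx1650".toList),
   ("rx 7900".toList, "rx7900".toList), ("rx 7800".toList, "rx7800".toList), ("rx 7700".toList, "rx7700".toList), ("rx 7600".toList, "rx7600".toList),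
   ("rx 6900".toList, "rx6900".toList), ("rx 6800".toList, "rx6800".toList), ("rx 6700".toList, "rx6700".toList), ("rx 6600".toList, "rx6600".toList), ("rx 6500".toList, "rx6500".toList)]

-- transliteration of Source B's next(...) first-match scan over the flat table
def pvFindB (name : List Char) : List (List Char × List Char) → Option (List Char)
  | [] => none
  | (sp, cp) :: rest =>
    if PySem.Chars.isIn sp name || PySem.Chars.isIn cp name then some sp
    else pvFindB name rest

def match_gpu_model_alt (gpu_name : String) : String :=
  let name := PySem.Chars.lower gpu_name.toList
  match pvFindB name pvGpuTable with
  | some sp => String.ofList sp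
  | none => "rtx 3060"

-- ===== PRECONDITION & SPEC =====
def Spec_match_gpu_model (gpu_name : String) (out : String) : Prop := out = match_gpu_model_alt gpu_name
instance (gpu_name : String) (out : String) : Decidable (Spec_match_gpu_model gpu_name out) := by unfold Spec_match_gpu_model; infer_instance

-- ===== CLAIM (what is proved, stated in full; the proofs are below) =====
def Claim_equal_match_gpu_model : Prop := ∀ (gpu_name : String), Dom_match_gpu_model gpu_name → Spec_match_gpu_model gpu_name (match_gpu_model gpu_name)

-- ===== LEMMAS AND PROOFS =====
-- proof-only helpers: the six consecutive blocks of B's table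
def pvT1 : List (List Char × List Char) := [("rtx 4090".toList, "rtx4090".toList), ("rtx 4080".toList, "rtx4080".toList), ("rtx 4070".toList, "rtx4070".toList), ("rtx 4060".toList, "rtx4060".toList)]
def pvT2 : List (List Char × List Char) := [("rtx 3090".toList, "rtx3090".toList), ("rtx 3080".toList, "rtx3080".toList), ("rtx 3070".toList, "rtx3070".toList), ("rtx 3060".toList, "rtx3060".toList), ("rtx 3050".toList, "rtx3050".toList)]
def pvT3 : List (List Char × List Char) := [("rtx 2080".toList, "rtx2080".toList), ("rtx 2070".toList, "rtx2070".toList), ("rtx 2060".toList, "rtx2060".toList)]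
def pvT4 : List (List Char × List Char) := [("gtx 1660".toList, "gtx1660".toList), ("gtx 1650".toList, "gtx1650".toList)]
def pvT5 : List (List Char × List Char) := [("rx 7900".toList, "rx7900".toList), ("rx 7800".toList, "rx7800".toList), ("rx 7700".toList, "rx7700".toList), ("rx 7600".toList, "rx7600".toList)]
def pvT6 : List (List Char × List Char) := [("rx 6900".toList, "rx6900".toList), ("rx 6800".toList, "rx6800".toList), ("rx 6700".toList, "rx6700".toList), ("rx 6600".toList, "rx6600".toList), ("rx 6500".toList, "rx6500".toList)]

lemma pvTableSplit : pvGpuTable = pvT1 ++ (pvT2 ++ (pvT3 ++ (pvT4 ++ (pvT5 ++ pvT6)))) := rfl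

lemma pv_isIn_mono (p q L : List Char) (h : p <:+: q) (hq : PySem.Chars.isIn q L = true) :
    PySem.Chars.isIn p L = true := by
  rw [PySem.Chars.isIn_iff_infix] at hq ⊢
  exact h.trans hq

-- any hit of A's inner loop contains the brand prefix, so the brand gate was true
lemma pvTryA_isIn (name pre : List Char) (ms : List (List Char)) (r : List Char)
    (h : pvTryA name pre ms = some r) : PySem.Chars.isIn pre name = true := by
  induction ms with
  | nil => simp [pvTryA] at h
  | cons m ms ih =>
    by_cases hc : (PySem.Chars.isIn (pre ++ ' ' :: m) name || PySem.Chars.isIn (pre ++ m) name) = true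
    · rcases (by simpa using hc :
          PySem.Chars.isIn (pre ++ ' ' :: m) name = true ∨ PySem.Chars.isIn (pre ++ m) name = true)
        with h' | h'
      · exact pv_isIn_mono _ _ _ (List.prefix_append pre (' ' :: m)).isInfix h'
      · exact pv_isIn_mono _ _ _ (List.prefix_append pre m).isInfix h'
    · rw [pvTryA, if_neg hc] at h
      exact ih h

lemma pvFindB_append (name : List Char) (t1 t2 : List (List Char × List Char)) :
    pvFindB name (t1 ++ t2) =
      (match pvFindB name t1 with
       | some r => some r
       | none => pvFindB name t2) := by
  induction t1 with
  | nil => rfl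
  | cons p rest ih =>
    obtain ⟨sp, cp⟩ := p
    by_cases hc : (PySem.Chars.isIn sp name || PySem.Chars.isIn cp name) = true
    · simp [pvFindB, hc]
    · simp [pvFindB, hc, ih]

lemma pv_main (s : String) : match_gpu_model s = match_gpu_model_alt s := by
  simp only [match_gpu_model, match_gpu_model_alt]
  set name := PySem.Chars.lower s.toList with hname
  rw [pvTableSplit, pvFindB_append,
      show pvFindB name pvT1 = pvTryA name "rtx".toList ["4090".toList, "4080".toList, "4070".toList, "4060".toList] from rfl]
  cases h1 : pvTryA name "rtx".toList ["4090".toList, "4080".toList, "4070".toList, "4060".toList] with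
  | some r =>
    have hb := pvTryA_isIn _ _ _ _ h1
    rw [if_pos (by rw [hb]; simp)]
  | none =>
  rw [pvFindB_append, show pvFindB name pvT2 = pvTryA name "rtx".toList ["3090".toList, "3080".toList, "3070".toList, "3060".toList, "3050".toList] from rfl]
  cases h2 : pvTryA name "rtx".toList ["3090".toList, "3080".toList, "3070".toList, "3060".toList, "3050".toList] with
  | some r =>
    have hb := pvTryA_isIn _ _ _ _ h2
    rw [if_pos (by rw [hb]; simp)]
  | none =>
  rw [pvFindB_append, show pvFindB name pvT3 = pvTryA name "rtx".toList ["2080".toList, "2070".toList, "2060".toList] from rfl]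
  cases h3 : pvTryA name "rtx".toList ["2080".toList, "2070".toList, "2060".toList] with
  | some r =>
    have hb := pvTryA_isIn _ _ _ _ h3
    rw [if_pos (by rw [hb]; simp)]
  | none =>
  rw [pvFindB_append, show pvFindB name pvT4 = pvTryA name "gtx".toList ["1660".toList, "1650".toList] from rfl]
  cases h4 : pvTryA name "gtx".toList ["1660".toList, "1650".toList] with
  | some r =>
    have hb := pvTryA_isIn _ _ _ _ h4
    rw [if_pos (by rw [hb]; simp)]
  | none =>
  rw [pvFindB_append, show pvFindB name pvT5 = pvTryA name "rx".toList ["7900".toList, "7800".toList, "7700".toList, "7600".toList] from rfl]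
  simp only [ite_self]
  cases h5 : pvTryA name "rx".toList ["7900".toList, "7800".toList, "7700".toList, "7600".toList] with
  | some r =>
    have hb := pvTryA_isIn _ _ _ _ h5
    rw [if_pos (by rw [hb]; simp)]
  | none =>
  rw [show pvFindB name pvT6 = pvTryA name "rx".toList ["6900".toList, "6800".toList, "6700".toList, "6600".toList, "6500".toList] from rfl]
  cases h6 : pvTryA name "rx".toList ["6900".toList, "6800".toList, "6700".toList, "6600".toList, "6500".toList] with
  | some r =>
    have hb := pvTryA_isIn _ _ _ _ h6
    rw [if_pos (by rw [hb]; simp)]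
  | none =>
    simp only [ite_self]

-- ===== VERDICT (by name: the statement is the Claim_ definition above) =====
theorem match_gpu_model_spec : Claim_equal_match_gpu_model := by
  intro s _
  exact pv_main s
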